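-- pv_equiv track=rewrite | github.com/blauert/infi-nl-Advent-of-Code | 2020 Bepakt en bezakt/bepakt_en_bezakt.py | aantal_pakjes_in_zak
-- ===== SOURCE A (Python) =====
-- def aantal_pakjes_in_zak(side_length):
--     pakjes_curr = side_length
--     pakjes = 0
--     for i in range(side_length):
--         pakjes += pakjes_curr
--         pakjes_curr += 2
--     middle = side_length * pakjes_curr
--     pakjes *= 2
--     pakjes += middle
--     return pakjes
-- ===== SOURCE B (Python) =====
-- # Closed form: the loop sums an arithmetic progression, collapsed to a quadratic (for nonnegative side lengths).
-- def aantal_pakjes_in_zak(side_length):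
--     return 7 * side_length * side_length - 2 * side_length
-- ===== Notes on version B (the rewrite author's own statement) =====
-- stated objective: faster
-- what changed: Replaces the O(n) accumulation loop by the closed-form arithmetic-series quadratic formula.
-- outside the precondition, e.g. on aantal_pakjes_in_zak(-3): A returns 9, B returns 69
import Mathlib
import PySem

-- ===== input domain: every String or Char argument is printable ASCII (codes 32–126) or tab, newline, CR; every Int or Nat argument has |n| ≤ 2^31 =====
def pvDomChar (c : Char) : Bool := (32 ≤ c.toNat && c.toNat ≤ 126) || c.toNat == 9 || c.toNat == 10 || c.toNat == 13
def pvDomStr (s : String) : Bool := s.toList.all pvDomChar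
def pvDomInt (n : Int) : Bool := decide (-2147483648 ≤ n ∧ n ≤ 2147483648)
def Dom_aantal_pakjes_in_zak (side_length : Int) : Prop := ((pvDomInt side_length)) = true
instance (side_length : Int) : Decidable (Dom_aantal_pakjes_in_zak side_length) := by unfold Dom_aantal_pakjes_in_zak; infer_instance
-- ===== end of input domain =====

-- B replaces A's O(n) accumulation loop by a closed-form quadratic (faster, asymptotic).
-- Pre_ restricts to the natural domain 0 ≤ side_length; for negative side lengths A's loop is
-- skipped and it returns side_length**2, an accident of the implementation on nonsense input.


-- ===== PORT A =====
def aantal_pakjes_in_zak (side_length : Int) : Int :=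
  -- pakjes_curr = side_length; pakjes = 0; for i in range(side_length): pakjes += pakjes_curr; pakjes_curr += 2
  let st := (PySem.List.pyRange 0 side_length 1).foldl
      (fun (st : Int × Int) _ => (st.1 + 2, st.2 + st.1)) (side_length, 0)
  let middle := side_length * st.1
  let pakjes := st.2 * 2
  pakjes + middle

-- ===== PORT B =====
def aantal_pakjes_in_zak_alt (side_length : Int) : Int :=
  7 * side_length * side_length - 2 * side_length

-- ===== PRECONDITION & SPEC =====
-- Pre_ restricts to the natural domain of a side length (0 ≤ s); for negative s A still returns
-- (s*s, the loop being skipped), a value B does not reproduce — see claim.json cites.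
def Pre_aantal_pakjes_in_zak (side_length : Int) : Prop := 0 ≤ side_length
instance (side_length : Int) : Decidable (Pre_aantal_pakjes_in_zak side_length) := by unfold Pre_aantal_pakjes_in_zak; infer_instance
def pvWitness_aantal_pakjes_in_zak : Int := (3)

def Spec_aantal_pakjes_in_zak (side_length : Int) (out : Int) : Prop := out = aantal_pakjes_in_zak_alt side_length
instance (side_length : Int) (out : Int) : Decidable (Spec_aantal_pakjes_in_zak side_length out) := by unfold Spec_aantal_pakjes_in_zak; infer_instance

-- ===== CLAIM (what is proved, stated in full; the proofs are below) =====
def Claim_equal_aantal_pakjes_in_zak : Prop := ∀ (side_length : Int), Dom_aantal_pakjes_in_zak side_length → Pre_aantal_pakjes_in_zak side_length → Spec_aantal_pakjes_in_zak side_length (aantal_pakjes_in_zak side_length)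

-- ===== LEMMAS AND PROOFS =====

-- The loop invariant: after folding over range(0, n), the state is (c + 2n, p + n*c + n*(n-1)).
theorem pv_loop_closed (n : Nat) (c p : Int) :
    (PySem.List.pyRange 0 (n : Int) 1).foldl
      (fun (st : Int × Int) _ => (st.1 + 2, st.2 + st.1)) (c, p)
    = (c + 2 * n, p + n * c + n * (n - 1)) := by
  induction n generalizing c p with
  | zero => simp [PySem.List.pyRange_one_eq_nil]
  | succ k ih =>
    rw [show ((k + 1 : Nat) : Int) = (k : Int) + 1 by push_cast; ring,
        PySem.List.pyRange_one_succ_right (by positivity), List.foldl_append, ih]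
    simp only [List.foldl_cons, List.foldl_nil]
    ring_nf

theorem aantal_pakjes_in_zak_spec : Claim_equal_aantal_pakjes_in_zak := by
  intro s _ hs
  unfold Spec_aantal_pakjes_in_zak aantal_pakjes_in_zak aantal_pakjes_in_zak_alt
  obtain ⟨n, rfl⟩ := Int.eq_ofNat_of_zero_le hs
  simp only [pv_loop_closed]
  ring
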